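-- pv_equiv track=rewrite | github.com/ShubhamKarampure/asl-streamlit-signlingo | pages/2_Learn Words_🧠.py | detected_word
-- ===== SOURCE A (Python) =====
-- def detected_word(WORD, detected_index):
--     markdown_str = f'<div style="font-family: Arial, sans-serif; font-weight: bold; text-align: center; font-size: 30px;">'
--     # Loop through each letter in the word
--     for i, letter in enumerate(WORD):
--         # Check if the current letter index is less than or equal to the detected index
--         if i <= detected_index:
--             # If yes, add the letter in green color
--             markdown_str += f'<span style="color:#ffe090;">{letter}</span>'
--         else:
--             # If no, add the letter in white color
--             markdown_str += f'<span style="color:white;">{letter}</span>'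
--     markdown_str += "</div>"
--     return markdown_str
-- ===== SOURCE B (Python) =====
-- def detected_word(WORD, detected_index):
--     split = max(0, min(len(WORD), detected_index + 1))
--     green = ''.join(f'<span style="color:#ffe090;">{c}</span>' for c in WORD[:split])
--     white = ''.join(f'<span style="color:white;">{c}</span>' for c in WORD[split:])
--     return ('<div style="font-family: Arial, sans-serif; font-weight: bold; text-align: center; font-size: 30px;">'
--             + green + white + '</div>')
-- ===== Notes on version B (the rewrite author's own statement) =====
-- stated objective: alternative
-- what changed: Replaces the per-character index comparison inside one enumerate loop by computing the split point once and concatenating two independently rendered slices (green prefix, white suffix).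
import Mathlib
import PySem

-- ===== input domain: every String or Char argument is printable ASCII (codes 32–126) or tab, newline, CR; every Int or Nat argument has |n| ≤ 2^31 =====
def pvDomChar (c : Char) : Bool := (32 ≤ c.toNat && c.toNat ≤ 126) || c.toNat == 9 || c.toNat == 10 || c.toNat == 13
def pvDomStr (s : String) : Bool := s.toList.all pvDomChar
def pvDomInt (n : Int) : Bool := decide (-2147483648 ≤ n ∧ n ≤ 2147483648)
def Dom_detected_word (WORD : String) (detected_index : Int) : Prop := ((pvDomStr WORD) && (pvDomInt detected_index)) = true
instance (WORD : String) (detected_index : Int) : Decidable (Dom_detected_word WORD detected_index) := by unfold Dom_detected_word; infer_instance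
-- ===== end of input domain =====

-- B builds the same HTML from two slices (green prefix / white suffix) computed from one split point,
-- instead of A's per-character index comparison; alternative decomposition, same cost.

-- shared literal fragments of the markup (identical byte strings in both Pythons)
def pvHeader : List Char := "<div style=\"font-family: Arial, sans-serif; font-weight: bold; text-align: center; font-size: 30px;\">".toList
def pvGreen (c : Char) : List Char := "<span style=\"color:#ffe090;\">".toList ++ [c] ++ "</span>".toList
def pvWhite (c : Char) : List Char := "<span style=\"color:white;\">".toList ++ [c] ++ "</span>".toList
def pvFooter : List Char := "</div>".toList

-- ===== PORT A =====
-- A: one loop over enumerate(WORD); per character, append a green or white span by comparing i ≤ detected_index.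
def detected_word (WORD : String) (detected_index : Int) : String :=
  let body := (PySem.List.enumerate WORD.toList).foldl
    (fun acc p => acc ++ (if p.1 ≤ detected_index then pvGreen p.2 else pvWhite p.2))
    pvHeader
  String.ofList (body ++ pvFooter)

-- ===== PORT B =====
-- B: split = max(0, min(len, detected_index+1)); render WORD[:split] all green and WORD[split:] all white, concatenate.
def detected_word_alt (WORD : String) (detected_index : Int) : String :=
  let split : Int := max 0 (min (WORD.toList.length : Int) (detected_index + 1))
  let green := ((PySem.List.slice WORD.toList none (some split)).map pvGreen).flatten
  let white := ((PySem.List.slice WORD.toList (some split) none).map pvWhite).flatten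
  String.ofList (pvHeader ++ green ++ white ++ pvFooter)

-- ===== PRECONDITION & SPEC =====
def Spec_detected_word (WORD : String) (detected_index : Int) (out : String) : Prop := out = detected_word_alt WORD detected_index
instance (WORD : String) (detected_index : Int) (out : String) : Decidable (Spec_detected_word WORD detected_index out) := by unfold Spec_detected_word; infer_instance

-- ===== CLAIM (what is proved, stated in full; the proofs are below) =====
def Claim_equal_detected_word : Prop := ∀ (WORD : String) (detected_index : Int), Dom_detected_word WORD detected_index → Spec_detected_word WORD detected_index (detected_word WORD detected_index)

-- ===== LEMMAS AND PROOFS =====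

-- A's enumerate loop, started at any index k, equals green-rendered take ++ white-rendered drop at (di+1-k).toNat
theorem pv_loop (cs : List Char) (di : Int) :
    ∀ (k : Int) (acc : List Char),
      (PySem.List.enumerate cs k).foldl
        (fun acc p => acc ++ (if p.1 ≤ di then pvGreen p.2 else pvWhite p.2)) acc
      = acc ++ ((cs.take (di + 1 - k).toNat).map pvGreen).flatten
            ++ ((cs.drop (di + 1 - k).toNat).map pvWhite).flatten := by
  induction cs with
  | nil => intro k acc; simp [PySem.List.enumerate]
  | cons c cs ih =>
    intro k acc
    simp only [PySem.List.enumerate, List.foldl_cons]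
    by_cases h : k ≤ di
    · have ht : (di + 1 - k).toNat = (di + 1 - (k + 1)).toNat + 1 := by omega
      rw [ih (k + 1), ht]
      simp [List.take_succ_cons, List.drop_succ_cons, List.append_assoc, h]
    · have ht : (di + 1 - k).toNat = 0 := by omega
      have ht' : (di + 1 - (k + 1)).toNat = 0 := by omega
      rw [ih (k + 1), ht, ht']
      simp [List.append_assoc, h]

-- ===== VERDICT (by name: the statement is the Claim_ definition above) =====
theorem detected_word_spec : Claim_equal_detected_word := by
  intro WORD di _
  unfold Spec_detected_word detected_word detected_word_alt
  have h := pv_loop WORD.toList di 0 pvHeader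
  simp only [sub_zero] at h
  rw [h]
  dsimp only
  have hs : 0 ≤ max 0 (min (WORD.toList.length : Int) (di + 1)) := le_max_left _ _
  rw [PySem.List.slice_to WORD.toList hs, PySem.List.slice_from WORD.toList hs]
  have htake : WORD.toList.take (max 0 (min (WORD.toList.length : Int) (di + 1))).toNat
      = WORD.toList.take (di + 1).toNat := by
    rcases le_or_gt (di + 1) (WORD.toList.length : Int) with hle | hgt
    · congr 1; omega
    · have h1 : (max 0 (min (WORD.toList.length : Int) (di + 1))).toNat = WORD.toList.length := by omega
      have h2 : WORD.toList.length ≤ (di + 1).toNat := by omega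
      rw [h1, List.take_length, List.take_of_length_le h2]
  have hdrop : WORD.toList.drop (max 0 (min (WORD.toList.length : Int) (di + 1))).toNat
      = WORD.toList.drop (di + 1).toNat := by
    rcases le_or_gt (di + 1) (WORD.toList.length : Int) with hle | hgt
    · congr 1; omega
    · have h1 : (max 0 (min (WORD.toList.length : Int) (di + 1))).toNat = WORD.toList.length := by omega
      have h2 : WORD.toList.length ≤ (di + 1).toNat := by omega
      rw [h1, List.drop_length, List.drop_of_length_le h2]
  rw [htake, hdrop]
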